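-- pv_equiv track=rewrite | github.com/kszabova/CommonSenseGeneration | callbacks/validation_callback.py | _prepare_refs_for_sacrebleu
-- ===== SOURCE A (Python) =====
-- def _prepare_refs_for_sacrebleu(references):
--     lengths = set([len(ref_list) for ref_list in references])
--     max_length = max(lengths)
--     sacrebleu_references = []
--     for ref_list in references:
--         cur_length = len(ref_list)
--         sacrebleu_references.append(
--             ref_list + ["" for _ in range(max_length - cur_length)]
--         )
--     return sacrebleu_references
-- ===== SOURCE B (Python) =====
-- def _prepare_refs_for_sacrebleu(references):
--     # Transpose: build padded columns, then zip them back into rows.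
--     columns = []
--     j = 0
--     while not all(len(r) <= j for r in references):
--         columns.append([r[j] if j < len(r) else "" for r in references])
--         j += 1
--     if not columns:
--         return [[] for _ in references]
--     return [list(row) for row in zip(*columns)]
-- ===== Notes on version B (the rewrite author's own statement) =====
-- stated objective: alternative
-- what changed: B pads by transposing: it builds the padded columns (one per position up to the longest row) and zips them back into rows, instead of computing the max length and appending padding to each row; Pre_ excludes only references = [], where A raises ValueError (max of an empty set) and B returns [].
-- outside the precondition, e.g. on _prepare_refs_for_sacrebleu([]): A raises ValueError, B returns []
import Mathlib
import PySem

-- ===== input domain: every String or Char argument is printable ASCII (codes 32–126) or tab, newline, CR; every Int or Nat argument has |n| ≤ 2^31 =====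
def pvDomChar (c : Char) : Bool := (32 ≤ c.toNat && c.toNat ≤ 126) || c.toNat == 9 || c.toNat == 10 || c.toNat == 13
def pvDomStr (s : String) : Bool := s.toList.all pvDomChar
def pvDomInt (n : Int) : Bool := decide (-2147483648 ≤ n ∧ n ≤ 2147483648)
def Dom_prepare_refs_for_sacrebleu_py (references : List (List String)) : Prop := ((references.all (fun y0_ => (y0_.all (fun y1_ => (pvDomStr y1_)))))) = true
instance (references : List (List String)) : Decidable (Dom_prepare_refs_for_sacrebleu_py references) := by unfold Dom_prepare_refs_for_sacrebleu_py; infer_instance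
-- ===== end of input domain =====

-- B pads by transposing (padded columns, then zipping them back into rows) instead of max-then-append per row; alternative algorithm, similar cost.


-- ===== PORT A =====
def prepare_refs_for_sacrebleu_py (references : List (List String)) : List (List String) :=
  let lengths : PySem.Set Int := PySem.Set.ofList (references.map (fun ref_list => (ref_list.length : Int)))
  match PySem.List.max? lengths (fun y => y) with
  | none => []   -- max(lengths) raises ValueError here (references = []); excluded by Pre_
  | some max_length =>
      references.foldl (fun acc ref_list =>
        acc ++ [ref_list ++ (PySem.List.pyRange 0 (max_length - (ref_list.length : Int)) 1).map (fun _ => "")]) []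

-- ===== PORT B =====
-- the 'while' loop of B: column j = [r[j] if j < len(r) else "" for r in references];
-- fuel only makes the recursion structural (the loop runs at most max-row-length ≤ total-size times)
def pvColumnsGo (references : List (List String)) : Nat → Nat → List (List String)
  | _, 0 => []
  | j, fuel + 1 =>
      if references.all (fun r => r.length ≤ j) then []
      else (references.map (fun r => r.getD j "")) :: pvColumnsGo references (j + 1) fuel

def pvColumns (references : List (List String)) : List (List String) :=
  pvColumnsGo references 0 ((references.map List.length).sum)

-- zip(*columns): consume the columns in lockstep (exact model of zip over equal-length columns);
-- fuel = length of the first column, the number of rows zip yields here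
def pvZipGo : Nat → List (List String) → List (List String)
  | 0, _ => []
  | fuel + 1, cols =>
      if cols.isEmpty || cols.any (fun c => c.isEmpty) then []
      else (cols.map (fun c => c.headD "")) :: pvZipGo fuel (cols.map List.tail)

def pvZip (cols : List (List String)) : List (List String) :=
  pvZipGo ((cols.headD []).length) cols

def prepare_refs_for_sacrebleu_py_alt (references : List (List String)) : List (List String) :=
  let columns := pvColumns references
  if columns.isEmpty then references.map (fun _ => [])
  else pvZip columns

-- ===== PRECONDITION & SPEC =====
-- Pre_ excludes references = [], the only input on which A raises (ValueError from max of an empty set).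
def Pre_prepare_refs_for_sacrebleu_py (references : List (List String)) : Prop := references ≠ []
instance (references : List (List String)) : Decidable (Pre_prepare_refs_for_sacrebleu_py references) := by unfold Pre_prepare_refs_for_sacrebleu_py; infer_instance
def pvWitness_prepare_refs_for_sacrebleu_py : List (List String) := [["a", "b"], ["c"]]

def Spec_prepare_refs_for_sacrebleu_py (references : List (List String)) (out : List (List String)) : Prop := out = prepare_refs_for_sacrebleu_py_alt references
instance (references : List (List String)) (out : List (List String)) : Decidable (Spec_prepare_refs_for_sacrebleu_py references out) := by unfold Spec_prepare_refs_for_sacrebleu_py; infer_instance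

-- ===== CLAIM (what is proved, stated in full; the proofs are below) =====
def Claim_equal_prepare_refs_for_sacrebleu_py : Prop := ∀ (references : List (List String)), Dom_prepare_refs_for_sacrebleu_py references → Pre_prepare_refs_for_sacrebleu_py references → Spec_prepare_refs_for_sacrebleu_py references (prepare_refs_for_sacrebleu_py references)

-- ===== LEMMAS AND PROOFS =====

-- the max row length: the number of columns B builds, and the padding target of A
def pvMaxLen (references : List (List String)) : Nat :=
  references.foldr (fun r m => Nat.max r.length m) 0

theorem pvMaxLen_cons (x : List String) (xs : List (List String)) :
    pvMaxLen (x :: xs) = max x.length (pvMaxLen xs) := rfl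

theorem pv_lt_maxLen (references : List (List String)) (j : Nat)
    (h : references.all (fun r => decide (r.length ≤ j)) = false) : j < pvMaxLen references := by
  induction references with
  | nil => simp at h
  | cons r rs ih =>
      simp only [List.all_cons, Bool.and_eq_false_iff, decide_eq_false_iff_not, not_le] at h
      rw [pvMaxLen_cons]
      rcases h with h | h
      · exact lt_of_lt_of_le h (le_max_left _ _)
      · exact lt_of_lt_of_le (ih h) (le_max_right _ _)

theorem pv_le_maxLen {references : List (List String)} {r : List String}
    (h : r ∈ references) : r.length ≤ pvMaxLen references := by
  induction references with
  | nil => simp at h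
  | cons x xs ih =>
      simp only [List.mem_cons] at h
      rw [pvMaxLen_cons]
      rcases h with rfl | h
      · exact le_max_left _ _
      · exact le_trans (ih h) (le_max_right _ _)

theorem pv_maxLen_mem {references : List (List String)} (h : references ≠ []) :
    (pvMaxLen references : Nat) ∈ references.map List.length := by
  induction references with
  | nil => exact absurd rfl h
  | cons x xs ih =>
      rw [pvMaxLen_cons]
      simp only [List.map_cons, List.mem_cons]
      rcases eq_or_ne xs [] with rfl | hxs
      · simp [pvMaxLen]
      · have := ih hxs
        rcases Nat.le_total x.length (pvMaxLen xs) with hle | hle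
        · right; rw [Nat.max_eq_right hle]; exact this
        · left; rw [Nat.max_eq_left hle]

theorem pv_maxLen_le {references : List (List String)} {j : Nat}
    (h : ∀ r ∈ references, r.length ≤ j) : pvMaxLen references ≤ j := by
  induction references with
  | nil => simp [pvMaxLen]
  | cons x xs ih =>
      rw [pvMaxLen_cons]
      have h1 := h x (by simp)
      have h2 := ih (fun r hr => h r (by simp [hr]))
      exact max_le h1 h2

theorem pv_maxLen_le_sum (references : List (List String)) :
    pvMaxLen references ≤ (references.map List.length).sum := by
  induction references with
  | nil => simp [pvMaxLen]
  | cons x xs ih =>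
      rw [pvMaxLen_cons]
      simp only [List.map_cons, List.sum_cons]
      exact max_le (Nat.le_add_right _ _) (le_trans ih (Nat.le_add_left _ _))

-- tail-index shift
theorem pv_tail_getD (l : List String) (j : Nat) : l.tail.getD j "" = l.getD (j + 1) "" := by
  cases l <;> simp [List.getD]

-- getD of a map at a valid index
theorem pv_getD_map {α β : Type} [Inhabited β] (f : α → β) (l : List α) (i : Nat) (d : β)
    (hi : i < l.length) : (l.map f).getD i d = f l[i] := by
  simp [List.getD, List.getElem?_map, List.getElem?_eq_getElem hi]

-- indexing a list with default past the end is exactly padding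
theorem pv_range_getD (l : List String) (k : Nat) (h : l.length ≤ k) :
    (List.range k).map (fun j => l.getD j "") = l ++ List.replicate (k - l.length) "" := by
  induction l generalizing k with
  | nil => simp [List.map_const']
  | cons x xs ih =>
      cases k with
      | zero => simp at h
      | succ k' =>
          rw [List.range_succ_eq_map]
          simp only [List.map_cons, List.map_map, List.getD_cons_zero, List.cons_append]
          congr 1
          have he : ((fun j => (x :: xs).getD j "") ∘ (fun i => i + 1)) = fun j => xs.getD j "" := by
            funext j; simp [List.getD]
          rw [he, ih k' (by simpa using h)]
          simp [List.length_cons, Nat.succ_sub_succ]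

-- characterization of the column loop
theorem pv_columnsGo_eq (references : List (List String)) (fuel : Nat) : ∀ (j : Nat),
    pvMaxLen references ≤ j + fuel →
    pvColumnsGo references j fuel =
      (List.range (pvMaxLen references - j)).map
        (fun i => references.map (fun r => r.getD (j + i) "")) := by
  induction fuel with
  | zero =>
      intro j hj
      rw [pvColumnsGo]
      simp [Nat.sub_eq_zero_of_le (by omega : pvMaxLen references ≤ j)]
  | succ fuel ih =>
      intro j hj
      rw [pvColumnsGo]
      by_cases h : references.all (fun r => r.length ≤ j)
      · rw [if_pos h]
        have hle : pvMaxLen references ≤ j := pv_maxLen_le (by simpa [List.all_eq_true] using h)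
        simp [Nat.sub_eq_zero_of_le hle]
      · rw [if_neg h]
        have hlt : j < pvMaxLen references := pv_lt_maxLen references j (by simpa using h)
        rw [ih (j + 1) (by omega)]
        have hk : pvMaxLen references - j = (pvMaxLen references - (j + 1)) + 1 := by omega
        rw [hk, List.range_succ_eq_map]
        simp only [List.map_cons, List.map_map, Nat.add_zero]
        congr 1
        apply List.map_congr_left
        intro i _
        simp only [Function.comp_apply, Nat.succ_eq_add_one,
          show ∀ i : Nat, j + 1 + i = j + (i + 1) from fun i => by omega]

theorem pv_columns_eq (references : List (List String)) :
    pvColumns references =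
      (List.range (pvMaxLen references)).map
        (fun i => references.map (fun r => r.getD i "")) := by
  unfold pvColumns
  rw [pv_columnsGo_eq references _ 0 (by simpa using pv_maxLen_le_sum references)]
  simp

-- characterization of zip over a nonempty list of equal-length columns
theorem pv_zipGo_eq (n : Nat) : ∀ (cols : List (List String)), cols ≠ [] →
    (∀ c ∈ cols, c.length = n) →
    pvZipGo n cols = (List.range n).map (fun i => cols.map (fun c => c.getD i "")) := by
  induction n with
  | zero => intro cols _ _; simp [pvZipGo]
  | succ n ih =>
      intro cols hne hlen
      have htail : ∀ c ∈ cols.map List.tail, c.length = n := by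
        intro c hc
        obtain ⟨c', hc', rfl⟩ := List.mem_map.mp hc
        have := hlen c' hc'
        cases c' with
        | nil => simp at this
        | cons x xs => simpa using this
      have hguard : (cols.isEmpty || cols.any (fun c => c.isEmpty)) = false := by
        cases cols with
        | nil => exact absurd rfl hne
        | cons c cs =>
            simp only [List.isEmpty_cons, Bool.false_or, List.any_eq_false]
            intro x hx
            have hxl := hlen x hx
            cases x with
            | nil => simp at hxl
            | cons y ys => simp
      rw [pvZipGo, hguard]
      simp only [Bool.false_eq_true, if_false]
      rw [ih (cols.map List.tail) (by simpa using hne) htail,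
          List.range_succ_eq_map, List.map_cons, List.map_map]
      congr 1
      · apply List.map_congr_left; intro c _; cases c <;> simp [List.getD]
      · apply List.map_congr_left; intro i _
        simp only [Function.comp_apply, List.map_map]
        apply List.map_congr_left; intro c _
        exact pv_tail_getD c i

theorem pv_zip_eq (n : Nat) (cols : List (List String)) (hne : cols ≠ [])
    (hlen : ∀ c ∈ cols, c.length = n) :
    pvZip cols = (List.range n).map (fun i => cols.map (fun c => c.getD i "")) := by
  unfold pvZip
  obtain ⟨c, cs, rfl⟩ := List.exists_cons_of_ne_nil hne
  rw [show ((c :: cs).headD []).length = n from hlen c (by simp)]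
  exact pv_zipGo_eq n (c :: cs) hne hlen

-- A computes the row-wise padding to pvMaxLen
theorem pv_A_eq (references : List (List String)) (h : references ≠ []) :
    prepare_refs_for_sacrebleu_py references =
      references.map
        (fun r => r ++ List.replicate (pvMaxLen references - r.length) "") := by
  unfold prepare_refs_for_sacrebleu_py
  have hLne : references.map (fun r => ((r.length : Int))) ≠ [] := by simp [h]
  have hset : PySem.Set.ofList (references.map (fun r => ((r.length : Int)))) ≠ [] := by
    intro hc
    obtain ⟨x, xs, he⟩ := List.exists_cons_of_ne_nil hLne
    have hx : x ∈ PySem.Set.ofList (references.map (fun r => ((r.length : Int)))) := by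
      rw [PySem.Set.mem_ofList, he]; simp
    simp [hc] at hx
  obtain ⟨m, hm⟩ : ∃ m, PySem.List.max?
      (PySem.Set.ofList (references.map (fun r => ((r.length : Int))))) (fun y => y) = some m := by
    cases hmm : PySem.List.max?
        (PySem.Set.ofList (references.map (fun r => ((r.length : Int))))) (fun y => y) with
    | none => exact absurd ((PySem.List.max?_eq_none_iff _ _).mp hmm) hset
    | some m => exact ⟨m, rfl⟩
  have hmem : m ∈ references.map (fun r => ((r.length : Int))) :=
    (PySem.Set.mem_ofList _ _).mp (PySem.List.max?_mem hm)
  have hmax : ∀ y ∈ references.map (fun r => ((r.length : Int))), y ≤ m := fun y hy =>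
    PySem.List.max?_isMax hm y ((PySem.Set.mem_ofList _ _).mpr hy)
  have hm_eq : m = (pvMaxLen references : Int) := by
    apply le_antisymm
    · simp only [List.mem_map] at hmem
      obtain ⟨r, hr, rfl⟩ := hmem
      exact_mod_cast pv_le_maxLen hr
    · apply hmax
      have hmm := pv_maxLen_mem h
      simp only [List.mem_map] at hmm ⊢
      obtain ⟨r, hr, hrl⟩ := hmm
      exact ⟨r, hr, by rw [hrl]⟩
  simp only [hm]
  rw [PySem.List.foldl_append_singleton_eq_map, List.nil_append]
  apply List.map_congr_left
  intro r hr
  congr 1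
  rw [hm_eq, PySem.List.pyRange_one]
  have hle : r.length ≤ pvMaxLen references := pv_le_maxLen hr
  have ht : ((pvMaxLen references : Int) - (r.length : Int) - 0).toNat
      = pvMaxLen references - r.length := by omega
  rw [ht, List.map_map]
  rw [show ((fun (_ : Int) => "") ∘ (fun k : Nat => ((0 : Int) + (k : Int)))) = fun (_ : Nat) => ("" : String) from rfl]
  rw [List.map_const']
  simp

-- ===== VERDICT (by name: the statement is the Claim_ definition above) =====
theorem prepare_refs_for_sacrebleu_py_spec : Claim_equal_prepare_refs_for_sacrebleu_py := by
  intro references _ hpre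
  unfold Spec_prepare_refs_for_sacrebleu_py
  have h : references ≠ [] := hpre
  rw [pv_A_eq references h]
  unfold prepare_refs_for_sacrebleu_py_alt
  rw [pv_columns_eq references]
  by_cases hk0 : pvMaxLen references = 0
  · rw [hk0]
    simp only [List.range_zero, List.map_nil, List.isEmpty_nil, if_true]
    apply List.map_congr_left
    intro r hr
    have hrle : r.length ≤ pvMaxLen references := pv_le_maxLen hr
    have hr0 : r = [] := List.eq_nil_of_length_eq_zero (by omega)
    simp [hr0]
  · have hcolsne : (List.range (pvMaxLen references)).map
        (fun i => references.map (fun r => r.getD i "")) ≠ [] := by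
      simp [List.range_eq_nil, hk0]
    rw [if_neg (by simpa [List.isEmpty_eq_false_iff] using hcolsne)]
    rw [pv_zip_eq references.length _ hcolsne
          (by intro c hc; simp only [List.mem_map] at hc
              obtain ⟨i, _, rfl⟩ := hc; simp)]
    apply List.ext_getElem (by simp)
    intro i h1 h2
    have hi : i < references.length := by simpa using h2
    simp only [List.getElem_map, List.getElem_range, List.map_map]
    rw [show ((fun c => (c : List String).getD i "") ∘
          (fun j => references.map (fun r => r.getD j ""))) = fun j => references[i].getD j ""
        from funext (fun j => pv_getD_map _ references i "" hi)]
    rw [pv_range_getD references[i] (pvMaxLen references)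
          (pv_le_maxLen (references.getElem_mem hi))]
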